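-- pv_equiv track=rewrite | github.com/chenpengcode/Leetcode | dp/1024_videoStitching.py | videoStitching_greed
-- ===== SOURCE A (Python) =====
-- from typing import List
--
-- def videoStitching_greed(clips: List[List[int]], T: int) -> int:
--     maxn = [0] * T
--     last = ret = pre = 0
--     for a, b in clips:
--         if a < T:
--             maxn[a] = max(maxn[a], b)
--
--     for i in range(T):
--         last = max(last, maxn[i])
--         if i == last:
--             return -1
--         if i == pre:
--             ret += 1
--             pre = last
--
--     return ret
-- ===== SOURCE B (Python) =====
-- from typing import List
--
-- def videoStitching_greed(clips: List[List[int]], T: int) -> int: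
--     maxn = [0] * T
--     for a, b in clips:
--         if a < T:
--             maxn[a] = max(maxn[a], b)
--
--     reach = []
--     m = 0
--     for v in maxn:
--         m = max(m, v)
--         reach.append(m)
--
--     cnt = 0
--     cur = 0
--     while cur < T:
--         nxt = reach[cur]
--         if nxt <= cur:
--             return -1
--         cur = nxt
--         cnt += 1
--     return cnt
-- ===== Notes on version B (the rewrite author's own statement) =====
-- stated objective: alternative
-- what changed: B replaces A's per-position greedy sweep that threads (last, pre, ret) through every index of range(T) with a precomputed prefix-max reach table plus a jump loop that hops cur -> reach[cur] and counts the hops.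
import Mathlib
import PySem

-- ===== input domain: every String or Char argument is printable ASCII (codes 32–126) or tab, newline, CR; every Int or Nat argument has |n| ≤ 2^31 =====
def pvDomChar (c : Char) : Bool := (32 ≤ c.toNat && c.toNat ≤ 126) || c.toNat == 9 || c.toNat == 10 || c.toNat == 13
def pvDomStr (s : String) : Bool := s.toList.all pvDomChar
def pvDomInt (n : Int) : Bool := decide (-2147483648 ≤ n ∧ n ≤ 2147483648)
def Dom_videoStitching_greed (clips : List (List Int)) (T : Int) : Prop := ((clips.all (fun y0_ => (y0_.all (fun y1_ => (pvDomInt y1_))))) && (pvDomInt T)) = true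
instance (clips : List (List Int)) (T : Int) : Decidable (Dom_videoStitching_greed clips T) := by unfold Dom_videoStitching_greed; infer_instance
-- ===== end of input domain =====

-- B replaces A's per-position greedy sweep with a prefix-max reach table plus a jump loop (alternative decomposition, same cost).
-- Pre_ excludes exactly the inputs where the Python A raises: a clip that is not a 2-element list (ValueError on unpacking),
-- or a clip whose start a satisfies a < T but a < -T (IndexError on maxn[a]).


-- ===== PORT A =====
-- hand port of Python list indexing/assignment on an int array (exact for -size <= i < size; callers stay in range under Pre_)
def pyArrIdx (n : Nat) (i : Int) : Nat := if 0 ≤ i then i.toNat else ((n : Int) + i).toNat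
def pyArrGet (xs : Array Int) (i : Int) : Int := xs.getD (pyArrIdx xs.size i) 0
def pyArrSet (xs : Array Int) (i : Int) (v : Int) : Array Int := xs.setIfInBounds (pyArrIdx xs.size i) v

-- maxn = [0]*T; for a, b in clips: if a < T: maxn[a] = max(maxn[a], b)
def buildMaxnA (clips : List (List Int)) (T : Int) : Array Int :=
  clips.foldl (fun maxn c =>
    let a := PySem.List.pyGetD c 0 0
    let b := PySem.List.pyGetD c 1 0
    if a < T then pyArrSet maxn a (max (pyArrGet maxn a) b) else maxn)
    (Array.replicate T.toNat 0)

-- for i in range(T): last = max(last, maxn[i]); if i == last: return -1; if i == pre: ret += 1; pre = last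
def sweepA (maxn : Array Int) : List Int → Int × Int × Int → Int
  | [], (_, _, ret) => ret
  | i :: rest, (last, pre, ret) =>
    let last' := max last (pyArrGet maxn i)
    if i = last' then -1
    else if i = pre then sweepA maxn rest (last', last', ret + 1)
    else sweepA maxn rest (last', pre, ret)

def videoStitching_greed (clips : List (List Int)) (T : Int) : Int :=
  sweepA (buildMaxnA clips T) (PySem.List.pyRange 0 T 1) (0, 0, 0)

-- ===== PORT B =====
-- same bucket pass as A (maxn[a] = max(maxn[a], b) for a < T)
def buildMaxnB (clips : List (List Int)) (T : Int) : Array Int :=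
  clips.foldl (fun maxn c =>
    let a := PySem.List.pyGetD c 0 0
    let b := PySem.List.pyGetD c 1 0
    if a < T then pyArrSet maxn a (max (pyArrGet maxn a) b) else maxn)
    (Array.replicate T.toNat 0)

-- reach = []; m = 0; for v in maxn: m = max(m, v); reach.append(m)
def prefixMaxB (maxn : Array Int) : Array Int :=
  (maxn.foldl (fun (s : Int × Array Int) v => (max s.1 v, s.2.push (max s.1 v))) (0, #[])).2

-- while cur < T: nxt = reach[cur]; if nxt <= cur: return -1; cur = nxt; cnt += 1
def jumpB (reach : Array Int) (T cur cnt : Int) : Int :=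
  if _h : cur < T then
    let nxt := pyArrGet reach cur
    if _h2 : nxt ≤ cur then -1 else jumpB reach T nxt (cnt + 1)
  else cnt
termination_by (T - cur).toNat
decreasing_by omega

def videoStitching_greed_alt (clips : List (List Int)) (T : Int) : Int :=
  jumpB (prefixMaxB (buildMaxnB clips T)) T 0 0

-- ===== PRECONDITION & SPEC =====
-- Pre_ excludes only inputs on which A raises: clips that are not 2-element lists (ValueError),
-- and clips with start a with a < T and a < -T (IndexError via negative indexing out of range).
def Pre_videoStitching_greed (clips : List (List Int)) (T : Int) : Prop :=
  ∀ c ∈ clips, c.length = 2 ∧ (c.head?.getD 0 < T → -T ≤ c.head?.getD 0)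
instance (clips : List (List Int)) (T : Int) : Decidable (Pre_videoStitching_greed clips T) := by
  unfold Pre_videoStitching_greed; infer_instance

def pvWitness_videoStitching_greed : List (List Int) × Int := ([[0, 2], [1, 3], [-2, 4]], 2)

def Spec_videoStitching_greed (clips : List (List Int)) (T : Int) (out : Int) : Prop := out = videoStitching_greed_alt clips T
instance (clips : List (List Int)) (T : Int) (out : Int) : Decidable (Spec_videoStitching_greed clips T out) := by unfold Spec_videoStitching_greed; infer_instance

-- ===== CLAIM (what is proved, stated in full; the proofs are below) =====
def Claim_equal_videoStitching_greed : Prop := ∀ (clips : List (List Int)) (T : Int), Dom_videoStitching_greed clips T → Pre_videoStitching_greed clips T → Spec_videoStitching_greed clips T (videoStitching_greed clips T)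

-- ===== LEMMAS AND PROOFS =====

-- bestF maxn i = max(0, maxn[0..i])  (the value of A's `last` after processing index i; bestF (0-1) = 0)
def bestF (maxn : Array Int) (i : Int) : Int := (maxn.toList.take (i + 1).toNat).foldl max 0

theorem le_foldl_max (l : List Int) (a : Int) : a ≤ l.foldl max a := by
  induction l generalizing a with
  | nil => simp
  | cons x xs ih => exact le_trans (le_max_left a x) (ih (max a x))

theorem bestF_mono (maxn : Array Int) {i j : Int} (h : i ≤ j) : bestF maxn i ≤ bestF maxn j := by
  unfold bestF
  have hn : (i + 1).toNat ≤ (j + 1).toNat := by omega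
  have := List.take_append_drop (i + 1).toNat (maxn.toList.take (j + 1).toNat)
  rw [List.take_take, Nat.min_eq_left hn] at this
  rw [← this, List.foldl_append]
  exact le_foldl_max _ _

theorem pyArrGet_eq (maxn : Array Int) {i : Int} (h0 : 0 ≤ i) (h1 : i < (maxn.size : Int)) :
    pyArrGet maxn i = maxn.toList[i.toNat]'(by simpa using (by omega : i.toNat < maxn.size)) := by
  unfold pyArrGet pyArrIdx
  rw [if_pos h0]
  have hi : i.toNat < maxn.size := by omega
  simp [Array.getD, hi]

theorem bestF_step (maxn : Array Int) {i : Int} (h0 : 0 ≤ i) (h1 : i < (maxn.size : Int)) :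
    bestF maxn i = max (bestF maxn (i - 1)) (pyArrGet maxn i) := by
  unfold bestF
  have hi : i.toNat < maxn.toList.length := by simpa using (by omega : i.toNat < maxn.size)
  have h2 : (i + 1).toNat = i.toNat + 1 := by omega
  have h3 : (i - 1 + 1).toNat = i.toNat := by omega
  rw [h2, h3, List.take_add_one, List.foldl_append,
      pyArrGet_eq maxn h0 h1, List.getElem?_eq_getElem hi]
  simp

-- recursive model of B's prefix-max pass
def pmList (m : Int) : List Int → List Int
  | [] => []
  | v :: l => max m v :: pmList (max m v) l

theorem pmList_length (m : Int) (l : List Int) : (pmList m l).length = l.length := by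
  induction l generalizing m with
  | nil => rfl
  | cons v l ih => simp [pmList, ih]

theorem prefixMax_fold_eq (l : List Int) : ∀ (m : Int) (acc : Array Int),
    ((l.foldl (fun (s : Int × Array Int) v => (max s.1 v, s.2.push (max s.1 v))) (m, acc)).2).toList
      = acc.toList ++ pmList m l := by
  induction l with
  | nil => intro m acc; simp [pmList]
  | cons v l ih =>
    intro m acc
    simp only [List.foldl_cons]
    rw [ih (max m v) (acc.push (max m v))]
    simp [pmList]

theorem prefixMaxB_toList (maxn : Array Int) : (prefixMaxB maxn).toList = pmList 0 maxn.toList := by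
  unfold prefixMaxB
  rw [← Array.foldl_toList]
  simpa using prefixMax_fold_eq maxn.toList 0 #[]

theorem pmList_getElem (l : List Int) : ∀ (m : Int) (k : Nat) (hk : k < l.length),
    (pmList m l)[k]'(by rw [pmList_length]; exact hk)
      = (l.take (k + 1)).foldl max m := by
  induction l with
  | nil => intro m k hk; simp at hk
  | cons v l ih =>
    intro m k hk
    cases k with
    | zero => simp [pmList]
    | succ k =>
      have hk' : k < l.length := by simpa using hk
      simp [pmList, ih (max m v) k hk']

theorem prefixMaxB_size (maxn : Array Int) : (prefixMaxB maxn).size = maxn.size := by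
  have := congrArg List.length (prefixMaxB_toList maxn)
  simpa [pmList_length] using this

theorem reach_spec (maxn : Array Int) {i : Int} (h0 : 0 ≤ i) (h1 : i < (maxn.size : Int)) :
    pyArrGet (prefixMaxB maxn) i = bestF maxn i := by
  have hi : i.toNat < maxn.toList.length := by simpa using (by omega : i.toNat < maxn.size)
  have hsz : i < ((prefixMaxB maxn).size : Int) := by rw [prefixMaxB_size]; exact h1
  rw [pyArrGet_eq _ h0 hsz]
  have hget : (prefixMaxB maxn).toList[i.toNat]'(by simpa using (by rw [prefixMaxB_size]; omega : i.toNat < (prefixMaxB maxn).size))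
      = (pmList 0 maxn.toList)[i.toNat]'(by rw [pmList_length]; exact hi) := by
    congr 1
    rw [prefixMaxB_toList]
  rw [hget, pmList_getElem maxn.toList 0 i.toNat hi]
  unfold bestF
  rw [show (i + 1).toNat = i.toNat + 1 from by omega]

theorem buildMaxn_len_aux (T : Int) (cs : List (List Int)) : ∀ (l : Array Int),
    (cs.foldl (fun maxn c =>
      let a := PySem.List.pyGetD c 0 0
      let b := PySem.List.pyGetD c 1 0
      if a < T then pyArrSet maxn a (max (pyArrGet maxn a) b) else maxn)
      l).size = l.size := by
  induction cs with
  | nil => intro l; rfl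
  | cons c cs ih =>
    intro l
    simp only [List.foldl_cons]
    rw [ih]
    split
    · simp [pyArrSet]
    · rfl

theorem buildMaxn_size (clips : List (List Int)) (T : Int) :
    (buildMaxnA clips T).size = T.toNat := by
  unfold buildMaxnA
  rw [buildMaxn_len_aux]
  simp

-- MAIN bridge: A's sweep from index i with last = bestF (i-1) equals B's jump loop at cur = pre.
theorem main_bridge (maxn reach : Array Int) (T : Int)
    (hlen : (maxn.size : Int) = T.toNat)
    (hreach : ∀ i : Int, 0 ≤ i → i < T → pyArrGet reach i = bestF maxn i) :
    ∀ (N : Nat) (i pre ret : Int), (T - i).toNat ≤ N → 0 ≤ i → i ≤ pre → pre ≤ bestF maxn (i - 1) →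
      sweepA maxn (PySem.List.pyRange i T 1) (bestF maxn (i - 1), pre, ret) = jumpB reach T pre ret := by
  intro N
  induction N with
  | zero =>
    intro i pre ret hN h0 hip hpb
    have hiT : T ≤ i := by omega
    rw [PySem.List.pyRange_one_eq_nil hiT, jumpB]
    have : ¬ pre < T := by omega
    simp [sweepA, this]
  | succ N ih =>
    intro i pre ret hN h0 hip hpb
    by_cases hiT : i < T
    · rw [PySem.List.pyRange_one_cons hiT]
      have hilen : i < (maxn.size : Int) := by omega
      have hstep := bestF_step maxn h0 hilen
      have hlast : max (bestF maxn (i - 1)) (pyArrGet maxn i) = bestF maxn i := hstep.symm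
      have hbi : i ≤ bestF maxn i :=
        le_trans hip (le_trans hpb (bestF_mono maxn (by omega)))
      simp only [sweepA, hlast]
      by_cases heq : i = bestF maxn i
      · -- A returns -1; then pre = i and B's nxt = bestF i = i ≤ cur
        have hpi : pre = i := by
          have h1 : pre ≤ bestF maxn i := le_trans hpb (bestF_mono maxn (by omega))
          omega
        rw [if_pos heq, hpi, jumpB, dif_pos hiT]
        have hreq : pyArrGet reach i = bestF maxn i := hreach i h0 hiT
        simp only [hreq]
        rw [dif_pos (show bestF maxn i ≤ i by omega)]
      · have hlt : i < bestF maxn i := lt_of_le_of_ne hbi heq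
        rw [if_neg heq]
        by_cases hpre : i = pre
        · rw [if_pos hpre]
          have h1 : bestF maxn (i + 1 - 1) = bestF maxn i := by norm_num
          have := ih (i + 1) (bestF maxn i) (ret + 1) (by omega) (by omega) (by omega)
            (by rw [h1])
          rw [h1] at this
          have hj : jumpB reach T i ret = jumpB reach T (bestF maxn i) (ret + 1) := by
            rw [jumpB, dif_pos hiT]
            simp only [hreach i h0 hiT]
            rw [dif_neg (show ¬ bestF maxn i ≤ i by omega)]
          rw [← hpre, hj]
          exact this
        · rw [if_neg hpre]
          have h1 : bestF maxn (i + 1 - 1) = bestF maxn i := by norm_num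
          have := ih (i + 1) pre ret (by omega) (by omega) (by omega)
            (by rw [h1]; exact le_trans hpb (bestF_mono maxn (by omega)))
          rw [h1] at this
          exact this
    · rw [PySem.List.pyRange_one_eq_nil (by omega), jumpB]
      have : ¬ pre < T := by omega
      simp [sweepA, this]

theorem bestF_neg_one (maxn : Array Int) : bestF maxn (0 - 1) = 0 := by
  unfold bestF; norm_num

-- ===== VERDICT (by name: the statement is the Claim_ definition above) =====
theorem videoStitching_greed_spec : Claim_equal_videoStitching_greed := by
  intro clips T _hdom _hpre
  unfold Spec_videoStitching_greed videoStitching_greed videoStitching_greed_alt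
  have hBA : buildMaxnB clips T = buildMaxnA clips T := rfl
  rw [hBA]
  set maxn := buildMaxnA clips T with hm
  have hlen : (maxn.size : Int) = T.toNat := by
    rw [hm, buildMaxn_size]
  have hreach : ∀ i : Int, 0 ≤ i → i < T → pyArrGet (prefixMaxB maxn) i = bestF maxn i := by
    intro i h0 hiT
    exact reach_spec maxn h0 (by omega)
  have := main_bridge maxn (prefixMaxB maxn) T hlen hreach (T - 0).toNat 0 0 0
    le_rfl le_rfl le_rfl (by rw [bestF_neg_one])
  rw [bestF_neg_one] at this
  simpa using this
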